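-- pv_equiv track=rewrite | github.com/0xCaretaker/HODL-bot | macd_signals.py | _trend_to_action
-- ===== SOURCE A (Python) =====
-- def _trend_to_action(trend_series):
--     action_list = []
--     last_trend = None
--
--     for trend in trend_series:
--         if trend == "B":
--             action_list.append("Buy")
--             last_trend = "Bullish"
--         elif trend == "S":
--             action_list.append("Sell")
--             last_trend = "Bearish"
--         else:
--             if last_trend == "Bullish":
--                 action_list.append("Hold")
--             elif last_trend == "Bearish":
--                 action_list.append("Wait for Buy")
--             else:
--                 action_list.append("Hold")
--
--     return action_list[-1] if action_list else "Hold"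
-- ===== SOURCE B (Python) =====
-- def _trend_to_action(trend_series):
--     items = list(trend_series)
--     if not items:
--         return "Hold"
--     last = items[-1]
--     if last == "B":
--         return "Buy"
--     if last == "S":
--         return "Sell"
--     for t in reversed(items[:-1]):
--         if t == "B":
--             return "Hold"
--         if t == "S":
--             return "Wait for Buy"
--     return "Hold"
-- ===== Notes on version B (the rewrite author's own statement) =====
-- stated objective: simpler
-- what changed: Instead of building the whole action list via a forward fold over trend state, B inspects only the last element and scans backwards for the most recent B/S signal, returning immediately; no intermediate list is built.
import Mathlib
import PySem

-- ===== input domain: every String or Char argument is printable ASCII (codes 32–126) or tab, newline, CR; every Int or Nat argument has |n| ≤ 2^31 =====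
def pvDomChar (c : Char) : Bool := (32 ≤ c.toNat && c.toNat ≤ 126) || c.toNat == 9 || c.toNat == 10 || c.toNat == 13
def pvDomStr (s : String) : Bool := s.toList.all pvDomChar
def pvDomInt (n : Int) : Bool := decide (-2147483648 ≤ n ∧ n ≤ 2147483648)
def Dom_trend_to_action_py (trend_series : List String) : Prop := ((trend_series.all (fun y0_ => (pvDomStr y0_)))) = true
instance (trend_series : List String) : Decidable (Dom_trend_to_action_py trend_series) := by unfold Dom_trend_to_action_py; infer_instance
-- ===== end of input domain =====

-- B replaces A's forward fold that builds the full action list with a direct backward scan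
-- from the last element (objective: simpler; no speed claimed).


-- ===== PORT A =====
-- A: forward fold building the action list and last_trend, then last element (or "Hold").
def pvStepA (st : List String × Option String) (trend : String) : List String × Option String :=
  if trend = "B" then (st.1 ++ ["Buy"], some "Bullish")
  else if trend = "S" then (st.1 ++ ["Sell"], some "Bearish")
  else if st.2 = some "Bullish" then (st.1 ++ ["Hold"], st.2)
  else if st.2 = some "Bearish" then (st.1 ++ ["Wait for Buy"], st.2)
  else (st.1 ++ ["Hold"], st.2)

def trend_to_action_py (trend_series : List String) : String :=
  let st := trend_series.foldl pvStepA ([], none)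
  match st.1.getLast? with
  | some a => a
  | none => "Hold"

-- ===== PORT B =====
-- B: look at the last element; otherwise scan the earlier elements in reverse for the most recent signal.
def pvFindSignal : List String → String
  | [] => "Hold"
  | t :: rest => if t = "B" then "Hold" else if t = "S" then "Wait for Buy" else pvFindSignal rest

def trend_to_action_py_alt (trend_series : List String) : String :=
  match trend_series.getLast? with
  | none => "Hold"
  | some last =>
    if last = "B" then "Buy"
    else if last = "S" then "Sell"
    else pvFindSignal trend_series.dropLast.reverse

-- ===== PRECONDITION & SPEC =====
def Spec_trend_to_action_py (trend_series : List String) (out : String) : Prop := out = trend_to_action_py_alt trend_series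
instance (trend_series : List String) (out : String) : Decidable (Spec_trend_to_action_py trend_series out) := by unfold Spec_trend_to_action_py; infer_instance

-- ===== CLAIM (what is proved, stated in full; the proofs are below) =====
def Claim_equal_trend_to_action_py : Prop := ∀ (trend_series : List String), Dom_trend_to_action_py trend_series → Spec_trend_to_action_py trend_series (trend_to_action_py trend_series)

-- ===== LEMMAS AND PROOFS =====
def pvTrFun (o : Option String) : String :=
  if o = some "Bullish" then "Hold" else if o = some "Bearish" then "Wait for Buy" else "Hold"

theorem pvFindSignal_eq (l : List String) :
    pvFindSignal l.reverse = pvTrFun ((l.foldl pvStepA ([], none)).2) := by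
  induction l using List.reverseRecOn with
  | nil => simp [pvFindSignal, pvTrFun]
  | append_singleton l t ih =>
    simp only [List.reverse_append, List.reverse_singleton, List.singleton_append,
      List.foldl_append, List.foldl_cons, List.foldl_nil, pvFindSignal, pvStepA]
    split_ifs with h1 h2 <;> simp_all [pvTrFun]

theorem trend_to_action_eq (l : List String) :
    trend_to_action_py l = trend_to_action_py_alt l := by
  induction l using List.reverseRecOn with
  | nil => rfl
  | append_singleton l t ih =>
    unfold trend_to_action_py trend_to_action_py_alt
    simp only [List.foldl_append, List.foldl_cons, List.foldl_nil,
      List.getLast?_concat, List.dropLast_concat]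
    simp only [pvStepA]
    split_ifs with h1 h2 h3 h4 <;>
      simp_all [pvFindSignal_eq, pvTrFun]

-- ===== VERDICT (by name: the statement is the Claim_ definition above) =====
theorem trend_to_action_py_spec : Claim_equal_trend_to_action_py := by
  intro l _
  unfold Spec_trend_to_action_py
  exact trend_to_action_eq l
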